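-- pv_equiv track=rewrite | github.com/neurostuff/neurostore | store/backend/neurostore/__init__.py | _path_matches_template
-- ===== SOURCE A (Python) =====
-- def _normalize_request_path(path):
--     if not path:
--         return "/"
--
--     normalized = str(path).strip()
--     if not normalized.startswith("/"):
--         normalized = f"/{normalized}"
--     if normalized != "/":
--         normalized = normalized.rstrip("/")
--     return normalized
--
-- def _path_matches_template(path, template):
--     normalized_path = _normalize_request_path(path)
--     normalized_template = _normalize_request_path(template)
--     if "<" not in normalized_template:
--         return normalized_path == normalized_template
--
--     path_segments = normalized_path.strip("/").split("/")
--     template_segments = normalized_template.strip("/").split("/")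
--     if len(path_segments) != len(template_segments):
--         return False
--
--     for actual, expected in zip(path_segments, template_segments):
--         if expected.startswith("<") and expected.endswith(">"):
--             if not actual:
--                 return False
--             continue
--         if actual != expected:
--             return False
--     return True
-- ===== SOURCE B (Python) =====
-- def _normalize_request_path(path):
--     s = str(path).strip() if path else "/"
--     if not s.startswith("/"):
--         s = "/" + s
--     return s if s == "/" else s.rstrip("/")
--
--
-- def _segments_match(actual, expected):
--     if not actual or not expected:
--         return actual == expected
--     a, e = actual[0], expected[0]
--     if e.startswith("<") and e.endswith(">"):
--         if not a:
--             return False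
--     elif a != e:
--         return False
--     return _segments_match(actual[1:], expected[1:])
--
--
-- def _path_matches_template(path, template):
--     normalized_path = _normalize_request_path(path)
--     normalized_template = _normalize_request_path(template)
--     if "<" not in normalized_template:
--         return normalized_path == normalized_template
--     return _segments_match(normalized_path.strip("/").split("/"),
--                            normalized_template.strip("/").split("/"))
-- ===== Notes on version B (the rewrite author's own statement) =====
-- stated objective: simpler
-- what changed: The length check plus zip loop over segment pairs is replaced by one structural recursion over the two segment lists (length mismatch falls out of the base cases), and the normalizer's four statements are folded into a single conditional expression.
import Mathlib
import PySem

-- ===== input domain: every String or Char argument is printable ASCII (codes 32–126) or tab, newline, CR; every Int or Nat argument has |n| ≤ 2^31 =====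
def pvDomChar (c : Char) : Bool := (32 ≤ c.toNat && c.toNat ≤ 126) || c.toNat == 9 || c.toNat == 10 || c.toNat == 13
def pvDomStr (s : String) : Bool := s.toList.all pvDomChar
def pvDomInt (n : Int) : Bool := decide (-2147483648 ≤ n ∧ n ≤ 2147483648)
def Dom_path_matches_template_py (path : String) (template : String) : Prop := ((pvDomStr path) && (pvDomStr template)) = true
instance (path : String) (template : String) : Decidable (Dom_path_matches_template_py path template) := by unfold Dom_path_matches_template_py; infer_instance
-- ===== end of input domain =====

-- B replaces A's length-check-plus-zip loop with a single structural recursion over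
-- the two segment lists and folds the normalizer's four statements into one expression
-- (objective: simpler; same cost).

-- ===== PORT A =====
-- s.rstrip("/"): no PySem primitive takes a chars argument for rstrip; exact hand port
-- (drops exactly the trailing '/' characters).
def pvRstripSlash (s : String) : String :=
  String.mk ((s.toList.reverse.dropWhile (fun c => c == '/')).reverse)

-- _normalize_request_path, as A writes it
def pvNormA (path : String) : String :=
  if path = "" then "/"
  else
    let normalized := PySem.Str.strip path
    let normalized := if PySem.Str.startswith normalized "/" then normalized else "/" ++ normalized
    if normalized ≠ "/" then pvRstripSlash normalized else normalized

def path_matches_template_py (path : String) (template : String) : Bool :=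
  let normalized_path := pvNormA path
  let normalized_template := pvNormA template
  if !(PySem.Str.isIn "<" normalized_template) then
    normalized_path == normalized_template
  else
    -- x.strip("/").split("/"): split? is none only for an empty separator, "/" is not empty
    let path_segments := (PySem.Str.split? (PySem.Str.stripChars normalized_path "/") "/").getD [""]
    let template_segments := (PySem.Str.split? (PySem.Str.stripChars normalized_template "/") "/").getD [""]
    if path_segments.length ≠ template_segments.length then false
    else (path_segments.zip template_segments).all fun ae =>
      if PySem.Str.startswith ae.2 "<" && PySem.Str.endswith ae.2 ">" then !(ae.1 == "")
      else ae.1 == ae.2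

-- ===== PORT B =====
-- Source B's _normalize_request_path
def pvNormB (path : String) : String :=
  let s := if path = "" then "/" else PySem.Str.strip path
  let s := if PySem.Str.startswith s "/" then s else "/" ++ s
  if s == "/" then s else pvRstripSlash s

-- Source B's _segments_match: structural recursion on both segment lists
def pvSegsMatch : List String → List String → Bool
  | [], [] => true
  | [], _ :: _ => false
  | _ :: _, [] => false
  | a :: ps, e :: ts =>
    if PySem.Str.startswith e "<" && PySem.Str.endswith e ">" then
      if a == "" then false else pvSegsMatch ps ts
    else if a != e then false
    else pvSegsMatch ps ts

def path_matches_template_py_alt (path : String) (template : String) : Bool :=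
  let normalized_path := pvNormB path
  let normalized_template := pvNormB template
  if !(PySem.Str.isIn "<" normalized_template) then
    normalized_path == normalized_template
  else
    pvSegsMatch ((PySem.Str.split? (PySem.Str.stripChars normalized_path "/") "/").getD [""])
                ((PySem.Str.split? (PySem.Str.stripChars normalized_template "/") "/").getD [""])

-- ===== PRECONDITION & SPEC =====
def Spec_path_matches_template_py (path : String) (template : String) (out : Bool) : Prop := out = path_matches_template_py_alt path template
instance (path : String) (template : String) (out : Bool) : Decidable (Spec_path_matches_template_py path template out) := by unfold Spec_path_matches_template_py; infer_instance

-- ===== CLAIM (what is proved, stated in full; the proofs are below) =====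
def Claim_equal_path_matches_template_py : Prop := ∀ (path : String) (template : String), Dom_path_matches_template_py path template → Spec_path_matches_template_py path template (path_matches_template_py path template)

-- ===== LEMMAS AND PROOFS =====

theorem pvNorm_eq (p : String) : pvNormA p = pvNormB p := by
  by_cases hp : p = ""
  · subst hp; rfl
  · unfold pvNormA pvNormB
    simp only [hp, if_neg, if_false, ite_not]
    by_cases h : (if PySem.Str.startswith (PySem.Str.strip p) "/" then PySem.Str.strip p
        else "/" ++ PySem.Str.strip p) = "/"
    · simp [h]
    · simp [h, beq_iff_eq]

theorem pvMatch_eq (ps ts : List String) :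
    (if ps.length ≠ ts.length then false
     else (ps.zip ts).all fun ae =>
        if PySem.Str.startswith ae.2 "<" && PySem.Str.endswith ae.2 ">" then !(ae.1 == "")
        else ae.1 == ae.2) = pvSegsMatch ps ts := by
  induction ps generalizing ts with
  | nil => cases ts <;> simp [pvSegsMatch]
  | cons a ps ih =>
    cases ts with
    | nil => simp [pvSegsMatch]
    | cons e ts =>
      by_cases h : ps.length = ts.length
      · simp only [pvSegsMatch, List.zip_cons_cons, List.all_cons, List.length_cons, h,
          ne_eq, not_true_eq_false, if_false, Nat.add_right_cancel_iff, not_false_eq_true]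
        rw [← ih ts]
        simp only [h, ne_eq, not_true_eq_false, if_false]
        by_cases hp : (PySem.Str.startswith e "<" && PySem.Str.endswith e ">") = true
        · simp only [hp, if_true]
          by_cases ha : a = "" <;> simp [ha]
        · simp only [hp, if_neg, Bool.not_eq_true] at *
          simp only [hp, if_false, bne_iff_ne, ne_eq, ite_not]
          by_cases he : a = e <;> simp [he]
      · have hn : ¬ (a :: ps).length = (e :: ts).length := by simp [h]
        simp only [hn, ne_eq, not_false_eq_true, if_true, pvSegsMatch]
        have := ih ts
        simp only [h, ne_eq, not_false_eq_true, if_true] at this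
        split_ifs <;> simp [← this]

-- ===== VERDICT (by name: the statement is the Claim_ definition above) =====
theorem path_matches_template_py_spec : Claim_equal_path_matches_template_py := by
  intro path template _
  unfold Spec_path_matches_template_py path_matches_template_py path_matches_template_py_alt
  rw [pvNorm_eq path, pvNorm_eq template]
  cases h : PySem.Str.isIn "<" (pvNormB template) with
  | true =>
    simp only [h, Bool.not_true, Bool.false_eq_true, if_false]
    exact pvMatch_eq _ _
  | false => simp only [h, Bool.not_false, if_true]
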